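-- pv_equiv track=rewrite | github.com/AmaadMartin/telekinetic_maze | utils/game_utils.py | update_visibility
-- ===== SOURCE A (Python) =====
-- def update_visibility(maze, player_pos, visibility_radius):
--     """
--     Updates the list of visible tiles based on the player's position and visibility radius.
--     """
--     visible_tiles = []
--     x0, y0 = player_pos
--     for y in range(len(maze)):
--         for x in range(len(maze[0])):
--             distance = abs(x - x0) + abs(y - y0)
--             if distance <= visibility_radius:
--                 visible_tiles.append((x, y))
--     return visible_tiles
-- ===== SOURCE B (Python) =====
-- def update_visibility(maze, player_pos, visibility_radius):
--     """
--     Updates the list of visible tiles based on the player's position and visibility radius.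
--     Iterates only the diamond of radius `visibility_radius`, clipped to the grid.
--     """
--     visible_tiles = []
--     x0, y0 = player_pos
--     h = len(maze)
--     w = len(maze[0]) if maze else 0
--     for y in range(max(0, y0 - visibility_radius), min(h, y0 + visibility_radius + 1)):
--         rem = visibility_radius - abs(y - y0)
--         for x in range(max(0, x0 - rem), min(w, x0 + rem + 1)):
--             visible_tiles.append((x, y))
--     return visible_tiles
-- ===== Notes on version B (the rewrite author's own statement) =====
-- stated objective: faster
-- what changed: Instead of scanning every cell of the W*H grid and testing the Manhattan distance, B iterates only the rows max(0,y0-R)..min(H,y0+R) and, per row, directly the clipped x-interval of the diamond, so no distance test and no out-of-diamond cells are visited.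
import Mathlib
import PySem

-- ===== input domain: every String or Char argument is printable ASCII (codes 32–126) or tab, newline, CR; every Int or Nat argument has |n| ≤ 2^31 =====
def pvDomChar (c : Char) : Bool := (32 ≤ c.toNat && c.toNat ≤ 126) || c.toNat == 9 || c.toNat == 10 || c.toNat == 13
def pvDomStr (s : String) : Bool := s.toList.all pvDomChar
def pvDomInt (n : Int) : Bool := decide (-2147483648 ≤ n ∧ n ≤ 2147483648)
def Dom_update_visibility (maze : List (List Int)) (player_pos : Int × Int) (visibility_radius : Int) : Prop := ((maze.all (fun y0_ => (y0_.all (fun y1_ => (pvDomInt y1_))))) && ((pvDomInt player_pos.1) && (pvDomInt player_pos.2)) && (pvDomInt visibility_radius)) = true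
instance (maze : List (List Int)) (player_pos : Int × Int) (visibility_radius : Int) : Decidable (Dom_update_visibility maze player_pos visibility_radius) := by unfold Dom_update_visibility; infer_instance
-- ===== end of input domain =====

-- B iterates only the diamond of radius R clipped to the grid instead of scanning the full grid (faster).
-- ===== PORT A =====
def update_visibility (maze : List (List Int)) (player_pos : Int × Int) (visibility_radius : Int) : List (Int × Int) :=
  let x0 := player_pos.1
  let y0 := player_pos.2
  (PySem.List.pyRange 0 maze.length 1).foldl (fun acc y =>
    (PySem.List.pyRange 0 (maze.headD []).length 1).foldl (fun acc x =>
      if |x - x0| + |y - y0| ≤ visibility_radius then acc ++ [(x, y)] else acc) acc) []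

-- ===== PORT B =====
def update_visibility_alt (maze : List (List Int)) (player_pos : Int × Int) (visibility_radius : Int) : List (Int × Int) :=
  let x0 := player_pos.1
  let y0 := player_pos.2
  let h : Int := maze.length
  let w : Int := if maze = [] then 0 else ((maze.headD []).length : Int)
  (PySem.List.pyRange (max 0 (y0 - visibility_radius)) (min h (y0 + visibility_radius + 1)) 1).foldl
    (fun acc y =>
      let rem := visibility_radius - |y - y0|
      (PySem.List.pyRange (max 0 (x0 - rem)) (min w (x0 + rem + 1)) 1).foldl
        (fun acc x => acc ++ [(x, y)]) acc) []

-- ===== PRECONDITION & SPEC =====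
def Spec_update_visibility (maze : List (List Int)) (player_pos : Int × Int) (visibility_radius : Int) (out : List (Int × Int)) : Prop := out = update_visibility_alt maze player_pos visibility_radius
instance (maze : List (List Int)) (player_pos : Int × Int) (visibility_radius : Int) (out : List (Int × Int)) : Decidable (Spec_update_visibility maze player_pos visibility_radius out) := by unfold Spec_update_visibility; infer_instance

-- ===== CLAIM (what is proved, stated in full; the proofs are below) =====
def Claim_equal_update_visibility : Prop := ∀ (maze : List (List Int)) (player_pos : Int × Int) (visibility_radius : Int), Dom_update_visibility maze player_pos visibility_radius → Spec_update_visibility maze player_pos visibility_radius (update_visibility maze player_pos visibility_radius)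

-- ===== LEMMAS AND PROOFS =====

-- Filtering an increasing integer range by a closed interval [c, d] clips the range.
theorem filter_pyRange_interval (a b c d : Int) :
    (PySem.List.pyRange a b 1).filter (fun x => decide (c ≤ x ∧ x ≤ d)) =
      PySem.List.pyRange (max a c) (min b (d + 1)) 1 := by
  by_cases hab : b ≤ a
  · rw [PySem.List.pyRange_one_eq_nil hab, PySem.List.pyRange_one_eq_nil (by omega)]
    rfl
  · have key : ∀ (n : Nat) (a : Int), (b - a).toNat = n →
        (PySem.List.pyRange a b 1).filter (fun x => decide (c ≤ x ∧ x ≤ d)) =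
          PySem.List.pyRange (max a c) (min b (d + 1)) 1 := by
      intro n
      induction n with
      | zero =>
        intro a ha
        rw [PySem.List.pyRange_one_eq_nil (by omega), PySem.List.pyRange_one_eq_nil (by omega)]
        rfl
      | succ k ih =>
        intro a ha
        rw [PySem.List.pyRange_one_cons (by omega), List.filter_cons]
        by_cases hc : c ≤ a ∧ a ≤ d
        · simp only [hc, decide_true, and_self, if_true]
          rw [ih (a + 1) (by omega)]
          have h1 : max a c = a := by omega
          have h2 : max (a + 1) c = a + 1 := by omega
          rw [h1, h2, ← PySem.List.pyRange_one_cons (by omega)]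
        · simp only [decide_eq_true_eq, hc, if_false]
          rw [ih (a + 1) (by omega)]
          by_cases hca : a < c
          · have : max a c = max (a + 1) c := by omega
            rw [this]
          · have hda : d < a := by omega
            rw [PySem.List.pyRange_one_eq_nil (by omega),
              PySem.List.pyRange_one_eq_nil (by omega)]
    exact key (b - a).toNat a rfl

theorem update_visibility_eq_flatMap (maze : List (List Int)) (player_pos : Int × Int)
    (visibility_radius : Int) :
    update_visibility maze player_pos visibility_radius =
      (PySem.List.pyRange 0 maze.length 1).flatMap (fun y =>
        ((PySem.List.pyRange 0 (maze.headD []).length 1).filter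
            (fun x => |x - player_pos.1| + |y - player_pos.2| ≤ visibility_radius)).map
          (fun x => (x, y))) := by
  unfold update_visibility
  rw [← List.nil_append ((PySem.List.pyRange 0 (maze.length : Int) 1).flatMap _)]
  rw [← PySem.List.foldl_append_eq_flatMap]
  refine PySem.List.foldl_congr_mem _ _ _ _ ?_
  intro acc y _
  rw [PySem.List.foldl_append_ite]

theorem update_visibility_alt_eq_flatMap (maze : List (List Int)) (player_pos : Int × Int)
    (visibility_radius : Int) :
    update_visibility_alt maze player_pos visibility_radius =
      (PySem.List.pyRange (max 0 (player_pos.2 - visibility_radius))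
          (min (maze.length : Int) (player_pos.2 + visibility_radius + 1)) 1).flatMap (fun y =>
        (PySem.List.pyRange (max 0 (player_pos.1 - (visibility_radius - |y - player_pos.2|)))
            (min (if maze = [] then 0 else ((maze.headD []).length : Int))
              (player_pos.1 + (visibility_radius - |y - player_pos.2|) + 1)) 1).map
          (fun x => (x, y))) := by
  unfold update_visibility_alt
  rw [← List.nil_append ((PySem.List.pyRange _ _ 1).flatMap _)]
  rw [← PySem.List.foldl_append_eq_flatMap]
  refine PySem.List.foldl_congr_mem _ _ _ _ ?_
  intro acc y _
  rw [PySem.List.foldl_append_singleton_eq_map]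

-- One row of A, written as B writes it: the filter clips to the diamond's x-interval.
theorem row_eq (w x0 y0 r y : Int) :
    ((PySem.List.pyRange 0 w 1).filter
        (fun x => decide (|x - x0| + |y - y0| ≤ r))).map (fun x => (x, y)) =
      (PySem.List.pyRange (max 0 (x0 - (r - |y - y0|))) (min w (x0 + (r - |y - y0|) + 1)) 1).map
        (fun x => (x, y)) := by
  have hpred : ∀ x ∈ PySem.List.pyRange 0 w 1,
      (decide (|x - x0| + |y - y0| ≤ r)) =
        (decide (x0 - (r - |y - y0|) ≤ x ∧ x ≤ x0 + (r - |y - y0|))) := by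
    intro x _
    rcases abs_cases (x - x0) with ⟨h1, _⟩ | ⟨h1, _⟩ <;>
      rcases abs_cases (y - y0) with ⟨h2, _⟩ | ⟨h2, _⟩ <;>
        rw [h1, h2] <;> (simp only [decide_eq_decide]; omega)
  rw [List.filter_congr hpred, filter_pyRange_interval]

-- Rows strictly outside the diamond contribute nothing in A.
theorem row_empty (w x0 y0 r y : Int) (hy : r < |y - y0|) :
    ((PySem.List.pyRange 0 w 1).filter
        (fun x => decide (|x - x0| + |y - y0| ≤ r))).map (fun x => (x, y)) =
      ([] : List (Int × Int)) := by
  rw [List.filter_eq_nil_iff.mpr, List.map_nil]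
  intro x _
  have hx : 0 ≤ |x - x0| := abs_nonneg _
  simp only [decide_eq_true_eq]
  omega

-- ===== VERDICT (by name: the statement is the Claim_ definition above) =====
theorem update_visibility_spec : Claim_equal_update_visibility := by
  intro maze player_pos visibility_radius _
  unfold Spec_update_visibility
  rw [update_visibility_eq_flatMap, update_visibility_alt_eq_flatMap]
  set x0 := player_pos.1 with hx0
  set y0 := player_pos.2 with hy0
  set r := visibility_radius with hr
  set h : Int := (maze.length : Int) with hh
  set w : Int := ((maze.headD []).length : Int) with hw
  have hwif : (if maze = [] then (0 : Int) else w) = if h ≤ 0 then 0 else w := by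
    cases maze with
    | nil => simp [hh]
    | cons a l =>
      simp only [hh, List.length_cons]
      have : ¬ ((a :: l : List (List Int)) = []) := by simp
      rw [if_neg this, if_neg (by push_cast; omega)]
  have hh0 : 0 ≤ h := by simp [hh]
  set lo := max 0 (y0 - r) with hlo
  set hi := min h (y0 + r + 1) with hhi
  by_cases hle : lo ≤ hi
  · -- split the full row range at lo and hi
    rw [PySem.List.pyRange_one_append 0 lo h (by omega) (by omega),
        PySem.List.pyRange_one_append lo hi h hle (by omega),
        List.flatMap_append, List.flatMap_append]
    have hleft : (PySem.List.pyRange 0 lo 1).flatMap (fun y =>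
        ((PySem.List.pyRange 0 w 1).filter
            (fun x => decide (|x - x0| + |y - y0| ≤ r))).map (fun x => (x, y))) = [] := by
      rw [List.flatMap_eq_nil_iff]
      intro y hy
      rw [PySem.List.mem_pyRange_one] at hy
      refine row_empty w x0 y0 r y ?_
      rcases abs_cases (y - y0) with ⟨h1, _⟩ | ⟨h1, _⟩ <;> omega
    have hright : (PySem.List.pyRange hi h 1).flatMap (fun y =>
        ((PySem.List.pyRange 0 w 1).filter
            (fun x => decide (|x - x0| + |y - y0| ≤ r))).map (fun x => (x, y))) = [] := by
      rw [List.flatMap_eq_nil_iff]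
      intro y hy
      rw [PySem.List.mem_pyRange_one] at hy
      refine row_empty w x0 y0 r y ?_
      rcases abs_cases (y - y0) with ⟨h1, _⟩ | ⟨h1, _⟩ <;> omega
    rw [hleft, hright, List.nil_append, List.append_nil]
    refine List.flatMap_congr ?_
    intro y hy
    rw [PySem.List.mem_pyRange_one] at hy
    rw [row_eq w x0 y0 r y, hwif]
    have hhpos : (if h ≤ 0 then (0 : Int) else w) = w := by
      rw [if_neg (by omega)]
    rw [hhpos]
  · -- empty row range: every row of A is outside the diamond (or the maze is empty)
    rw [show PySem.List.pyRange lo hi 1 = [] from PySem.List.pyRange_one_eq_nil (by omega),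
        List.flatMap_nil, List.flatMap_eq_nil_iff]
    intro y hy
    rw [PySem.List.mem_pyRange_one] at hy
    refine row_empty w x0 y0 r y ?_
    rcases abs_cases (y - y0) with ⟨h1, _⟩ | ⟨h1, _⟩ <;> omega
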